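-- pv_equiv track=rewrite | github.com/guofuwei/Python-Learn | homework/work6.py | age_find
-- ===== SOURCE A (Python) =====
-- def age_find(nums):
--     age_list = []
--     sum_list = []
--     # 寻找nums的三个公因数
--     for a in range(1, nums+1):
--         for b in range(1, a+1):
--             for c in range(1, b+1):
--                 if a*b*c == nums:
--                     age_list.append([a, b, c])
--                     sum_list.append(a+b+c)
--                 else:
--                     continue
--     # 返回
--     return age_list, sum_list
-- ===== SOURCE B (Python) =====
-- def age_find(nums):
--     # Stage 1: build the divisor list of nums once.  Stage 2: for each divisor a
--     # (ascending) pair it with the divisors b <= a of nums//a; the third factor is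
--     # forced, c = nums // (a*b), kept when c <= b.  Sums are a separate map pass.
--     divisors = [d for d in range(1, nums + 1) if nums % d == 0]
--     triples = []
--     for a in divisors:
--         m = nums // a
--         triples.extend([a, b, m // b] for b in divisors
--                        if b <= a and m % b == 0 and m // b <= b)
--     return triples, [sum(t) for t in triples]
-- ===== Notes on version B (the rewrite author's own statement) =====
-- stated objective: faster
-- what changed: B replaces A's cubic scan over all triples by a staged divisor pipeline: it builds the divisor list of nums once, pairs each divisor a with divisors b<=a of nums//a, computes the forced third factor c=nums//(a*b) in closed form, and derives the sums by a separate map over the triples instead of a parallel accumulator.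
import Mathlib
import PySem

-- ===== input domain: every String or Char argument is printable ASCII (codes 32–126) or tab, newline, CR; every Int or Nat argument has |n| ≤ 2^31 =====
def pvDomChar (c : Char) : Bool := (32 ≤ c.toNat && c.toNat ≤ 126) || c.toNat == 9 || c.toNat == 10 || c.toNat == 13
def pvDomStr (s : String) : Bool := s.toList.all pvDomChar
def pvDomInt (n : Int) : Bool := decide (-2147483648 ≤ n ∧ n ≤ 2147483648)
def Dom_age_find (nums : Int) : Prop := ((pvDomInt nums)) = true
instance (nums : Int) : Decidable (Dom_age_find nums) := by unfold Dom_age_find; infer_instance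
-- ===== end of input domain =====

-- B replaces A's cubic triple scan by a staged divisor pipeline (divisor list, pairs, forced third factor, sums by a map); return value only, no mutation.

-- ===== PORT A =====
def age_find (nums : Int) : List (List Int) × List Int :=
  (PySem.List.pyRange 1 (nums + 1) 1).foldl (fun st a =>
    (PySem.List.pyRange 1 (a + 1) 1).foldl (fun st b =>
      (PySem.List.pyRange 1 (b + 1) 1).foldl (fun st c =>
        if a * b * c = nums then (st.1 ++ [[a, b, c]], st.2 ++ [a + b + c]) else st) st) st)
    ([], [])

-- ===== PORT B =====
def age_find_alt (nums : Int) : List (List Int) × List Int :=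
  let divisors := (PySem.List.pyRange 1 (nums + 1) 1).filter
    (fun d => PySem.Int.mod nums d == 0)
  let triples := divisors.flatMap (fun a =>
    let m := PySem.Int.floordiv nums a
    (divisors.filter (fun b =>
        decide (b ≤ a) && (PySem.Int.mod m b == 0) && decide (PySem.Int.floordiv m b ≤ b))).map
      (fun b => [a, b, PySem.Int.floordiv m b]))
  (triples, triples.map (fun t => t.foldl (· + ·) 0))

-- ===== PRECONDITION & SPEC =====
def Spec_age_find (nums : Int) (out : List (List Int) × List Int) : Prop := out = age_find_alt nums
instance (nums : Int) (out : List (List Int) × List Int) : Decidable (Spec_age_find nums out) := by unfold Spec_age_find; infer_instance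

-- ===== CLAIM (what is proved, stated in full; the proofs are below) =====
def Claim_equal_age_find : Prop := ∀ (nums : Int), Dom_age_find nums → Spec_age_find nums (age_find nums)

-- ===== LEMMAS AND PROOFS =====

-- a fold pushing one element on each component when a test holds
theorem foldl_pair_if {α β γ : Type} (P : γ → Prop) [DecidablePred P] (u : γ → α) (v : γ → β)
    (l : List γ) (s : List α × List β) :
    l.foldl (fun st c => if P c then (st.1 ++ [u c], st.2 ++ [v c]) else st) s
      = (s.1 ++ (l.filter (fun c => decide (P c))).map u,
         s.2 ++ (l.filter (fun c => decide (P c))).map v) := by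
  induction l generalizing s with
  | nil => simp
  | cons h t ih => by_cases hP : P h <;> simp [hP, ih]

-- a fold appending a block on each component
theorem foldl_pair_app {α β γ : Type} (F : γ → List α) (G : γ → List β)
    (l : List γ) (s : List α × List β) :
    l.foldl (fun st b => (st.1 ++ F b, st.2 ++ G b)) s
      = (s.1 ++ l.flatMap F, s.2 ++ l.flatMap G) := by
  induction l generalizing s with
  | nil => simp
  | cons h t ih => simp [ih]

theorem flatMap_congr_mem {α β : Type} {f g : α → List β} {l : List α}
    (h : ∀ a ∈ l, f a = g a) : l.flatMap f = l.flatMap g := by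
  induction l with
  | nil => rfl
  | cons x t ih => simp [h x (by simp), ih (fun a ha => h a (by simp [ha]))]

-- flatMap over a filtered list = flatMap with an emptiness guard over the full list
theorem flatMap_filter {α β : Type} (p : α → Bool) (f : α → List β) (l : List α) :
    (l.filter p).flatMap f = l.flatMap (fun a => if p a then f a else []) := by
  induction l with
  | nil => rfl
  | cons x t ih => by_cases hx : p x <;> simp [hx, ih]

theorem filter_map_eq_flatMap {α : Type} (p : Int → Bool) (u : Int → α) (l : List Int) :
    (l.filter p).map u = l.flatMap (fun b => if p b then [u b] else []) := by
  induction l with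
  | nil => rfl
  | cons x t ih => by_cases hx : p x <;> simp [hx, ih]

theorem filter_eq_singleton_of_nodup (l : List Int) (h : l.Nodup) (x : Int) :
    l.filter (fun c => decide (c = x)) = if x ∈ l then [x] else [] := by
  induction l with
  | nil => rfl
  | cons a t ih =>
    rcases List.nodup_cons.mp h with ⟨hna, hnt⟩
    by_cases hax : a = x
    · subst hax
      have ht : t.filter (fun c => decide (c = a)) = [] := by
        apply List.filter_eq_nil_iff.mpr
        intro c hc
        simp only [decide_eq_true_eq]
        rintro rfl
        exact hna hc
      simp [ht, hna]
    · simp [hax, ih hnt, Ne.symm hax]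

-- a bounded filter of range(1, n+1) collapses to the same filter of range(1, a+1)
theorem filter_range_le (n a : Int) (h1 : 1 ≤ a) (h2 : a ≤ n) (p : Int → Bool) :
    (PySem.List.pyRange 1 (n + 1) 1).filter (fun b => decide (b ≤ a) && p b)
      = (PySem.List.pyRange 1 (a + 1) 1).filter p := by
  rw [PySem.List.pyRange_one_append 1 (a + 1) (n + 1) (by omega) (by omega),
    List.filter_append]
  have hR : (PySem.List.pyRange (a + 1) (n + 1) 1).filter (fun b => decide (b ≤ a) && p b)
      = [] := by
    apply List.filter_eq_nil_iff.mpr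
    intro b hb
    rcases (PySem.List.mem_pyRange_one).mp hb with ⟨hb1, _⟩
    simp [show ¬ b ≤ a by omega]
  rw [hR, List.append_nil]
  apply List.filter_congr
  intro b hb
  rcases (PySem.List.mem_pyRange_one).mp hb with ⟨_, hb2⟩
  simp [show b ≤ a by omega]

-- the heart: for 1 ≤ a ≤ nums, A's double inner scan equals the divisor pass
theorem coreA {α : Type} (nums a : Int) (ha1 : 1 ≤ a) (han : a ≤ nums) (f : Int → Int → α) :
    (PySem.List.pyRange 1 (a + 1) 1).flatMap (fun b =>
        ((PySem.List.pyRange 1 (b + 1) 1).filter (fun c => decide (a * b * c = nums))).map (f b))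
      = if PySem.Int.mod nums a = 0 then
          ((PySem.List.pyRange 1 (a + 1) 1).filter (fun b =>
              decide (PySem.Int.mod (PySem.Int.floordiv nums a) b = 0 ∧
                      PySem.Int.floordiv (PySem.Int.floordiv nums a) b ≤ b))).map
            (fun b => f b (PySem.Int.floordiv (PySem.Int.floordiv nums a) b))
        else [] := by
  have ha0 : (0:Int) < a := by omega
  have hn1 : (1:Int) ≤ nums := le_trans ha1 han
  by_cases hdvd : PySem.Int.mod nums a = 0
  · set m := PySem.Int.floordiv nums a with hmdef
    have hnm : m * a = nums := by
      have h := PySem.Int.floordiv_mul_add_mod nums a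
      rw [hdvd] at h; linarith
    have hm1 : (1:Int) ≤ m := by nlinarith
    simp only [hdvd, if_pos]
    rw [filter_map_eq_flatMap]
    apply flatMap_congr_mem
    intro b hb
    rcases (PySem.List.mem_pyRange_one).mp hb with ⟨hb1, hb2⟩
    have hb0 : (0:Int) < b := by omega
    by_cases hbd : PySem.Int.mod m b = 0
    · set c0 := PySem.Int.floordiv m b with hc0def
      have hmc : c0 * b = m := by
        have h := PySem.Int.floordiv_mul_add_mod m b
        rw [hbd] at h; linarith
      have hc01 : (1:Int) ≤ c0 := by
        by_contra hc
        have hc' : c0 ≤ 0 := by omega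
        nlinarith
      have hcond : ∀ c, (a * b * c = nums) ↔ c = c0 := by
        intro c
        constructor
        · intro h
          have hab : a * b ≠ 0 := by positivity
          apply mul_left_cancel₀ hab
          linear_combination h - hnm - a * hmc
        · rintro rfl
          linear_combination hnm + a * hmc
      rw [List.filter_congr (q := fun c => decide (c = c0)) (by intro c _; simp [hcond c])]
      rw [filter_eq_singleton_of_nodup _ (PySem.List.nodup_pyRange_one 1 (b+1)) c0]
      by_cases hle : c0 ≤ b
      · have hmem : c0 ∈ PySem.List.pyRange 1 (b + 1) 1 :=
          (PySem.List.mem_pyRange_one).mpr ⟨hc01, by omega⟩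
        simp [hmem, hbd, hle]
      · have hmem : c0 ∉ PySem.List.pyRange 1 (b + 1) 1 := by
          intro hmem
          rcases (PySem.List.mem_pyRange_one).mp hmem with ⟨_, h2⟩
          exact hle (by omega)
        simp [hmem, hbd, hle]
    · have hfil : (PySem.List.pyRange 1 (b + 1) 1).filter
          (fun c => decide (a * b * c = nums)) = [] := by
        apply List.filter_eq_nil_iff.mpr
        intro c _
        simp only [decide_eq_true_eq]
        intro h
        have hbm : b ∣ m := by
          refine ⟨c, ?_⟩
          have hab : a ≠ 0 := by omega
          apply mul_left_cancel₀ hab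
          linear_combination hnm - h
        exact hbd ((PySem.Int.mod_eq_zero_iff_dvd m b).mpr hbm)
      simp [hfil, hbd]
  · rw [if_neg hdvd]
    rw [show ([] : List α) = (PySem.List.pyRange 1 (a + 1) 1).flatMap (fun _ => ([] : List α)) by
      simp]
    apply flatMap_congr_mem
    intro b _
    have hfil : (PySem.List.pyRange 1 (b + 1) 1).filter
        (fun c => decide (a * b * c = nums)) = [] := by
      apply List.filter_eq_nil_iff.mpr
      intro c _
      simp only [decide_eq_true_eq]
      intro h
      exact hdvd ((PySem.Int.mod_eq_zero_iff_dvd nums a).mpr ⟨b * c, by linear_combination -h⟩)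
    simp [hfil]

-- B's per-a block (for a divisor a within range) equals coreA's right-hand side
theorem coreB {α : Type} (nums a : Int) (ha1 : 1 ≤ a) (han : a ≤ nums)
    (hda : PySem.Int.mod nums a = 0) (f : Int → Int → α) :
    (((PySem.List.pyRange 1 (nums + 1) 1).filter (fun d => PySem.Int.mod nums d == 0)).filter
        (fun b => decide (b ≤ a) && (PySem.Int.mod (PySem.Int.floordiv nums a) b == 0) &&
                  decide (PySem.Int.floordiv (PySem.Int.floordiv nums a) b ≤ b))).map
      (fun b => f b (PySem.Int.floordiv (PySem.Int.floordiv nums a) b))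
      = ((PySem.List.pyRange 1 (a + 1) 1).filter (fun b =>
            decide (PySem.Int.mod (PySem.Int.floordiv nums a) b = 0 ∧
                    PySem.Int.floordiv (PySem.Int.floordiv nums a) b ≤ b))).map
          (fun b => f b (PySem.Int.floordiv (PySem.Int.floordiv nums a) b)) := by
  set m := PySem.Int.floordiv nums a with hmdef
  have hnm : m * a = nums := by
    have h := PySem.Int.floordiv_mul_add_mod nums a
    rw [hda] at h; linarith
  congr 1
  rw [List.filter_filter]
  have hcongr : (PySem.List.pyRange 1 (nums + 1) 1).filter
      (fun b => (decide (b ≤ a) && (PySem.Int.mod m b == 0) &&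
                  decide (PySem.Int.floordiv m b ≤ b)) && (PySem.Int.mod nums b == 0))
      = (PySem.List.pyRange 1 (nums + 1) 1).filter
        (fun b => decide (b ≤ a) &&
          decide (PySem.Int.mod m b = 0 ∧ PySem.Int.floordiv m b ≤ b)) := by
    apply List.filter_congr
    intro b hb
    rcases (PySem.List.mem_pyRange_one).mp hb with ⟨hb1, _⟩
    by_cases hba : b ≤ a
    · by_cases hmb : PySem.Int.mod m b = 0
      · have hnb : PySem.Int.mod nums b = 0 := by
          apply (PySem.Int.mod_eq_zero_iff_dvd nums b).mpr
          rcases (PySem.Int.mod_eq_zero_iff_dvd m b).mp hmb with ⟨k, hk⟩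
          exact ⟨k * a, by rw [← hnm, hk]; ring⟩
        by_cases hle : PySem.Int.floordiv m b ≤ b <;> simp [hba, hmb, hnb, hle]
      · simp [hba, hmb]
    · simp [hba]
  rw [hcongr, filter_range_le nums a ha1 han]

-- ===== VERDICT (by name: the statement is the Claim_ definition above) =====
theorem age_find_spec : Claim_equal_age_find := by
  intro nums _
  unfold Spec_age_find age_find age_find_alt
  simp only [foldl_pair_if, foldl_pair_app, List.nil_append]
  rw [List.map_flatMap]
  refine Prod.ext ?_ ?_ <;> simp only
  · rw [flatMap_filter]
    apply flatMap_congr_mem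
    intro a ha
    rcases (PySem.List.mem_pyRange_one).mp ha with ⟨ha1, ha2⟩
    rw [coreA nums a ha1 (by omega)]
    by_cases hd : PySem.Int.mod nums a = 0
    · rw [if_pos hd, if_pos (by simp [hd]),
        coreB nums a ha1 (by omega) hd (fun b c => [a, b, c])]
    · rw [if_neg hd, if_neg (by simp [hd])]
  · rw [flatMap_filter]
    apply flatMap_congr_mem
    intro a ha
    rcases (PySem.List.mem_pyRange_one).mp ha with ⟨ha1, ha2⟩
    rw [coreA nums a ha1 (by omega)]
    by_cases hd : PySem.Int.mod nums a = 0
    · rw [if_pos hd, if_pos (by simp [hd]),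
        ← coreB nums a ha1 (by omega) hd (fun b c => a + b + c), List.map_map]
      apply List.map_congr_left
      intro b _
      simp [List.foldl, Function.comp]
    · rw [if_neg hd, if_neg (by simp [hd])]
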